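-- pv_equiv track=rewrite | github.com/amima-mansour/Expert-System | parsing.py | rule_is_valid
-- ===== SOURCE A (Python) =====
-- def is_upper(c):
--     'Check if a string / character is upper alphabetical value'
--
--     if type(c) is chr:
--         ascii_val = ord(c)
--         if ascii_val < 65 or ascii_val > 90:
--             return False
--         return True
--     else:
--         for e in c:
--             ascii_val = ord(e)
--             if ascii_val < 65 or ascii_val > 90:
--                 return False
--         return True
--
-- def brackets(s):
--     'The function below checks if parentheses are correctly closed'
--
--     stack = []
--     pushChar = '('
--     popChar = ')'
--     for c in s:
--         if c == pushChar:
--             stack.append(c)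
--         elif c == popChar:
--             if stack == []:
--                 return False
--             else:
--                 stack.pop()
--     return stack == []
--
-- def rule_is_valid(line):
--     'Check if a rule is given a valid way'
--
--     ops = {
--             '!': [['(', '+', '|', '^', 'S'], ['(', 'L']],
--             '^': [[')', 'L'], ['(', 'L', '!']],
--             '+': [[')', 'L'], ['(', 'L', '!']],
--             '|': [[')', 'L'], ['(', 'L', '!']],
--             '(': [['(', '!', '+', '|', '^', 'S'], ['(', 'L']],
--             ')': [['L'], ['+', '|', '^', 'E', '<']],
--             'L': [['(', '+', '|', '^', 'S', '!'], [')', '+', '|', '^', 'E', '<']],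
--             }
--     split = line.split("=>")
--     if len(split) != 2:
--         return False
--     for part in split:
--         if not brackets(part):
--             return False
--         i = 0
--         l = len(part)
--         if l < 1:
--             return False
--         while i < l:
--             if is_upper(part[i]):
--                 if (i > 0):
--                     if is_upper(part[i - 1]) or part[i - 1] not in ops['L'][0]:
--                         return False
--                 if (i + 1 < l):
--                     if is_upper(part[i + 1]) or part[i + 1] not in ops['L'][1]:
--                         return False
--             elif part[i] in ops:
--                 if i == 0:
--                     if 'S' not in ops[part[i]][0]:
--                         return False
--                 elif is_upper(part[i - 1]):
--                     if 'L' not in ops[part[i]][0]: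
--                         return False
--                 elif part[i - 1] not in ops[part[i]][0]:
--                     return False
--                 if i + 1 >= l:
--                     if 'E' not in ops[part[i]][1]:
--                         return False
--                 elif is_upper(part[i + 1]):
--                     if 'L' not in ops[part[i]][1]:
--                         return False
--                 elif part[i + 1] not in ops[part[i]][1]:
--                     return False
--             elif part[i] != '<' or i + 1 != l:
--                 return False
--             i += 1
--     return True
-- ===== SOURCE B (Python) =====
-- SUCC = {
--     'S': set('!(L<'),
--     '!': set('(L'),
--     '^': set('(L!'),
--     '+': set('(L!'),
--     '|': set('(L!'),
--     '(': set('(L'),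
--     ')': set('+|^E<'),
--     'L': set(')+|^E<'),
--     '<': set('E'),
-- }
--
-- def _classify(c):
--     if 'A' <= c <= 'Z':
--         return 'L'
--     if c in '!^+|()<':
--         return c
--     return '?'
--
-- def _balanced(p):
--     depth = 0
--     for c in p:
--         if c == '(':
--             depth += 1
--         elif c == ')':
--             depth -= 1
--             if depth < 0:
--                 return False
--     return depth == 0
--
-- def _part_ok(p):
--     if not _balanced(p):
--         return False
--     prev = 'S'
--     for c in p:
--         t = _classify(c)
--         if t not in SUCC[prev]:
--             return False
--         prev = t
--     return 'E' in SUCC[prev]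
--
-- def rule_is_valid(line):
--     'Check if a rule is given a valid way (single-pass successor-state machine)'
--     parts = line.split("=>")
--     if len(parts) != 2:
--         return False
--     return all(_part_ok(p) for p in parts)
-- ===== Notes on version B (the rewrite author's own statement) =====
-- stated objective: alternative
-- what changed: A's indexed while-loop that re-examines both neighbours of every position (and its stack-based parenthesis check) is replaced by a single forward pass of a successor state machine: each character is classified into a token class once and every adjacent pair (with virtual start/end states) is checked against one precomputed successor table; the bracket check keeps an integer depth counter instead of a stack.
import Mathlib
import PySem

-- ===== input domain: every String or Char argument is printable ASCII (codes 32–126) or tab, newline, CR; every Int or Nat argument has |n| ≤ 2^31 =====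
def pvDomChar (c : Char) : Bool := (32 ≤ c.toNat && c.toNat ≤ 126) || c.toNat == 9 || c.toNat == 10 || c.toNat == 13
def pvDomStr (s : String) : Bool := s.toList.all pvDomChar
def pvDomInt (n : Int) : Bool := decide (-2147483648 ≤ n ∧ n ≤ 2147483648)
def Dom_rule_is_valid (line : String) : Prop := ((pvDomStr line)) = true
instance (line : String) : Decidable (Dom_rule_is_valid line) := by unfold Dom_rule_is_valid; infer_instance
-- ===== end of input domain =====

-- B replaces A's indexed look-both-ways scan by a single-pass successor state machine
-- (virtual start/end tokens, one compatibility table) and A's bracket stack by a depth counter;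
-- same return value on every input (both are total).

-- ===== PORT A =====

-- is_upper: the Python `type(c) is chr` branch is dead (chr is a builtin function, never a
-- type), so only the for-loop branch is ported; A only ever calls it on 1-char strings part[i].
def pv_is_upper_go : List Char → Bool
  | [] => true
  | e :: rest => if e.toNat < 65 || 90 < e.toNat then false else pv_is_upper_go rest

def pv_is_upper (c : List Char) : Bool := pv_is_upper_go c

def pv_brackets_go : List Char → List Char → Bool
  | stack, [] => stack.isEmpty
  | stack, c :: s =>
      if c = '(' then pv_brackets_go ('(' :: stack) s
      else if c = ')' then
        (match stack with
         | [] => false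
         | _ :: st => pv_brackets_go st s)
      else pv_brackets_go stack s

def pv_brackets (s : List Char) : Bool := pv_brackets_go [] s

def pv_ops : PySem.Dict Char (List Char × List Char) := PySem.Dict.mk [
  ('!', (['(', '+', '|', '^', 'S'], ['(', 'L'])),
  ('^', ([')', 'L'], ['(', 'L', '!'])),
  ('+', ([')', 'L'], ['(', 'L', '!'])),
  ('|', ([')', 'L'], ['(', 'L', '!'])),
  ('(', (['(', '!', '+', '|', '^', 'S'], ['(', 'L'])),
  (')', (['L'], ['+', '|', '^', 'E', '<'])),
  ('L', (['(', '+', '|', '^', 'S', '!'], [')', '+', '|', '^', 'E', '<']))]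

-- the `while i < l` loop of rule_is_valid; part[j] is in range at every access (guarded),
-- ported as getD; ops[part[i]] is guarded by `part[i] in ops`, ported as getD.
def pv_loopA (part : List Char) (i : Nat) : Bool :=
  if _h : i < part.length then
    if pv_is_upper [part.getD i ' '] then
      if i > 0 &&
          (pv_is_upper [part.getD (i - 1) ' '] ||
            !((pv_ops.getD 'L' ([], [])).1.contains (part.getD (i - 1) ' '))) then false
      else if i + 1 < part.length &&
          (pv_is_upper [part.getD (i + 1) ' '] ||
            !((pv_ops.getD 'L' ([], [])).2.contains (part.getD (i + 1) ' '))) then false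
      else pv_loopA part (i + 1)
    else if pv_ops.contains (part.getD i ' ') then
      if (if i = 0 then !((pv_ops.getD (part.getD i ' ') ([], [])).1.contains 'S')
          else if pv_is_upper [part.getD (i - 1) ' '] then
            !((pv_ops.getD (part.getD i ' ') ([], [])).1.contains 'L')
          else !((pv_ops.getD (part.getD i ' ') ([], [])).1.contains (part.getD (i - 1) ' '))) then
        false
      else if (if part.length ≤ i + 1 then !((pv_ops.getD (part.getD i ' ') ([], [])).2.contains 'E')
          else if pv_is_upper [part.getD (i + 1) ' '] then
            !((pv_ops.getD (part.getD i ' ') ([], [])).2.contains 'L')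
          else !((pv_ops.getD (part.getD i ' ') ([], [])).2.contains (part.getD (i + 1) ' '))) then
        false
      else pv_loopA part (i + 1)
    else if part.getD i ' ' ≠ '<' || i + 1 ≠ part.length then false
    else pv_loopA part (i + 1)
  else true
termination_by part.length - i

-- the `for part in split` loop with its early returns
def pv_partsA : List (List Char) → Bool
  | [] => true
  | p :: rest =>
      if !pv_brackets p then false
      else if p.length < 1 then false
      else if !pv_loopA p 0 then false
      else pv_partsA rest

def rule_is_valid (line : String) : Bool :=
  let split := PySem.Chars.splitOn line.toList ['=', '>']
  if split.length ≠ 2 then false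
  else pv_partsA split

-- ===== PORT B =====

inductive PvTok where
  | S | E | Bang | Caret | Plus | Pipe | LP | RP | L | Lt | Bad
deriving DecidableEq, Repr

def pv_classify (c : Char) : PvTok :=
  if 65 ≤ c.toNat && c.toNat ≤ 90 then .L
  else if c = '!' then .Bang
  else if c = '^' then .Caret
  else if c = '+' then .Plus
  else if c = '|' then .Pipe
  else if c = '(' then .LP
  else if c = ')' then .RP
  else if c = '<' then .Lt
  else .Bad

-- the SUCC table of Source B
def pv_succ : PvTok → PvTok → Bool
  | .S, t => t == .Bang || t == .LP || t == .L || t == .Lt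
  | .Bang, t => t == .LP || t == .L
  | .Caret, t => t == .LP || t == .L || t == .Bang
  | .Plus, t => t == .LP || t == .L || t == .Bang
  | .Pipe, t => t == .LP || t == .L || t == .Bang
  | .LP, t => t == .LP || t == .L
  | .RP, t => t == .Plus || t == .Pipe || t == .Caret || t == .E || t == .Lt
  | .L, t => t == .RP || t == .Plus || t == .Pipe || t == .Caret || t == .E || t == .Lt
  | .Lt, t => t == .E
  | _, _ => false

def pv_balanced_go (depth : Int) : List Char → Bool
  | [] => depth == 0
  | c :: s =>
      if c = '(' then pv_balanced_go (depth + 1) s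
      else if c = ')' then (if depth - 1 < 0 then false else pv_balanced_go (depth - 1) s)
      else pv_balanced_go depth s

def pv_scan : PvTok → List Char → Bool
  | prev, [] => pv_succ prev .E
  | prev, c :: s => if !pv_succ prev (pv_classify c) then false else pv_scan (pv_classify c) s

def pv_partB (p : List Char) : Bool :=
  if !pv_balanced_go 0 p then false else pv_scan .S p

def rule_is_valid_alt (line : String) : Bool :=
  let parts := PySem.Chars.splitOn line.toList ['=', '>']
  if parts.length ≠ 2 then false
  else parts.all pv_partB

-- ===== PRECONDITION & SPEC =====
def Spec_rule_is_valid (line : String) (out : Bool) : Prop := out = rule_is_valid_alt line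
instance (line : String) (out : Bool) : Decidable (Spec_rule_is_valid line out) := by unfold Spec_rule_is_valid; infer_instance

-- ===== CLAIM (what is proved, stated in full; the proofs are below) =====
def Claim_equal_rule_is_valid : Prop := ∀ (line : String), Dom_rule_is_valid line → Spec_rule_is_valid line (rule_is_valid line)

-- ===== LEMMAS AND PROOFS =====

-- A's per-position check at index i, split into its predecessor half and successor half,
-- expressed on the two characters involved (proof-side only).

-- predecessor check at i = 0
def pvLS (c : Char) : Bool :=
  if pv_is_upper [c] then true
  else if pv_ops.contains c then (pv_ops.getD c ([], [])).1.contains 'S'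
  else if c = '<' then true
  else false

-- predecessor check at i > 0, previous character p
def pvL (p c : Char) : Bool :=
  if pv_is_upper [c] then
    !(pv_is_upper [p] || !((pv_ops.getD 'L' ([], [])).1.contains p))
  else if pv_ops.contains c then
    (if pv_is_upper [p] then (pv_ops.getD c ([], [])).1.contains 'L'
     else (pv_ops.getD c ([], [])).1.contains p)
  else if c = '<' then true
  else false

-- successor check at i = length - 1
def pvRE (c : Char) : Bool :=
  if pv_is_upper [c] then true
  else if pv_ops.contains c then (pv_ops.getD c ([], [])).2.contains 'E'
  else true

-- successor check at i < length - 1, next character n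
def pvR (c n : Char) : Bool :=
  if pv_is_upper [c] then
    !(pv_is_upper [n] || !((pv_ops.getD 'L' ([], [])).2.contains n))
  else if pv_ops.contains c then
    (if pv_is_upper [n] then (pv_ops.getD c ([], [])).2.contains 'L'
     else (pv_ops.getD c ([], [])).2.contains n)
  else if c = '<' then false
  else true

def pvREnd (c : Char) : List Char → Bool
  | [] => pvRE c
  | d :: _ => pvR c d

theorem pv_is_upper_single (c : Char) :
    pv_is_upper [c] = (65 <= c.toNat && c.toNat <= 90) := by
  simp only [pv_is_upper, pv_is_upper_go]
  split_ifs with h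
  · simp at h ⊢; omega
  · simp at h ⊢; omega

theorem pv_classify_L {c : Char} (h : pv_classify c = .L) : pv_is_upper [c] = true := by
  rw [pv_is_upper_single]; unfold pv_classify at h; split_ifs at h <;> simp_all

theorem pv_classify_not_L {c : Char} (h : pv_classify c ≠ .L) : pv_is_upper [c] = false := by
  rw [pv_is_upper_single]; unfold pv_classify at h; split_ifs at h <;> simp_all

theorem pv_classify_Bang {c : Char} (h : pv_classify c = .Bang) : c = '!' := by
  unfold pv_classify at h; split_ifs at h with h1 h2; exact h2
theorem pv_classify_Caret {c : Char} (h : pv_classify c = .Caret) : c = '^' := by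
  unfold pv_classify at h; split_ifs at h with h1 h2 h3; exact h3
theorem pv_classify_Plus {c : Char} (h : pv_classify c = .Plus) : c = '+' := by
  unfold pv_classify at h; split_ifs at h with h1 h2 h3 h4; exact h4
theorem pv_classify_Pipe {c : Char} (h : pv_classify c = .Pipe) : c = '|' := by
  unfold pv_classify at h; split_ifs at h with h1 h2 h3 h4 h5; exact h5
theorem pv_classify_LP {c : Char} (h : pv_classify c = .LP) : c = '(' := by
  unfold pv_classify at h; split_ifs at h with h1 h2 h3 h4 h5 h6; exact h6
theorem pv_classify_RP {c : Char} (h : pv_classify c = .RP) : c = ')' := by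
  unfold pv_classify at h; split_ifs at h with h1 h2 h3 h4 h5 h6 h7; exact h7
theorem pv_classify_Lt {c : Char} (h : pv_classify c = .Lt) : c = '<' := by
  unfold pv_classify at h; split_ifs at h with h1 h2 h3 h4 h5 h6 h7 h8; exact h8
theorem pv_classify_ne_S (c : Char) : pv_classify c ≠ .S := by
  unfold pv_classify; split_ifs <;> simp
theorem pv_classify_ne_E (c : Char) : pv_classify c ≠ .E := by
  unfold pv_classify; split_ifs <;> simp

theorem pv_classify_Bad {c : Char} (h : pv_classify c = .Bad) :
    pv_is_upper [c] = false ∧ pv_ops.contains c = false ∧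
    c ≠ '!' ∧ c ≠ '^' ∧ c ≠ '+' ∧ c ≠ '|' ∧ c ≠ '(' ∧ c ≠ ')' ∧ c ≠ '<' ∧
    c ≠ 'S' ∧ c ≠ 'L' ∧ c ≠ 'E' := by
  have hup := pv_classify_not_L (c := c) (by rw [h]; decide)
  unfold pv_classify at h
  split_ifs at h with h1 h2 h3 h4 h5 h6 h7 h8
  rw [pv_is_upper_single] at hup
  have hS : c ≠ 'S' := by intro e; subst e; simp_all
  have hL : c ≠ 'L' := by intro e; subst e; simp_all
  have hE : c ≠ 'E' := by intro e; subst e; simp_all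
  refine ⟨by rw [pv_is_upper_single]; exact hup, ?_, h2, h3, h4, h5, h6, h7, h8, hS, hL, hE⟩
  simp [pv_ops, PySem.Dict.contains_mk]
  exact ⟨fun e => h2 e.symm, fun e => h3 e.symm, fun e => h4 e.symm, fun e => h5 e.symm,
    fun e => h6 e.symm, fun e => h7 e.symm, fun e => hL e.symm⟩

-- literal evaluations of the ops dict (closed terms)
theorem pv_ops_g_bang : pv_ops.getD '!' ([], []) = (['(', '+', '|', '^', 'S'], ['(', 'L']) := by decide
theorem pv_ops_g_caret : pv_ops.getD '^' ([], []) = ([')', 'L'], ['(', 'L', '!']) := by decide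
theorem pv_ops_g_plus : pv_ops.getD '+' ([], []) = ([')', 'L'], ['(', 'L', '!']) := by decide
theorem pv_ops_g_pipe : pv_ops.getD '|' ([], []) = ([')', 'L'], ['(', 'L', '!']) := by decide
theorem pv_ops_g_lp : pv_ops.getD '(' ([], []) = (['(', '!', '+', '|', '^', 'S'], ['(', 'L']) := by decide
theorem pv_ops_g_rp : pv_ops.getD ')' ([], []) = (['L'], ['+', '|', '^', 'E', '<']) := by decide
theorem pv_ops_g_L : pv_ops.getD 'L' ([], []) = (['(', '+', '|', '^', 'S', '!'], [')', '+', '|', '^', 'E', '<']) := by decide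
theorem pv_ops_has_bang : pv_ops.contains '!' = true := by decide
theorem pv_ops_has_caret : pv_ops.contains '^' = true := by decide
theorem pv_ops_has_plus : pv_ops.contains '+' = true := by decide
theorem pv_ops_has_pipe : pv_ops.contains '|' = true := by decide
theorem pv_ops_has_lp : pv_ops.contains '(' = true := by decide
theorem pv_ops_has_rp : pv_ops.contains ')' = true := by decide
theorem pv_ops_not_lt : pv_ops.contains '<' = false := by decide

theorem pv_up_bang : pv_is_upper ['!'] = false := by decide
theorem pv_up_caret : pv_is_upper ['^'] = false := by decide
theorem pv_up_plus : pv_is_upper ['+'] = false := by decide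
theorem pv_up_pipe : pv_is_upper ['|'] = false := by decide
theorem pv_up_lp : pv_is_upper ['('] = false := by decide
theorem pv_up_rp : pv_is_upper [')'] = false := by decide
theorem pv_up_lt : pv_is_upper ['<'] = false := by decide

theorem pv_succ_bad (t : PvTok) : pv_succ t .Bad = false := by cases t <;> rfl

-- the three character-level correspondence lemmas
theorem pvLS_eq (d : Char) : pvLS d = pv_succ .S (pv_classify d) := by
  rcases hd : pv_classify d
  case S => exact absurd hd (pv_classify_ne_S d)
  case E => exact absurd hd (pv_classify_ne_E d)
  case Bang => obtain rfl := pv_classify_Bang hd; decide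
  case Caret => obtain rfl := pv_classify_Caret hd; decide
  case Plus => obtain rfl := pv_classify_Plus hd; decide
  case Pipe => obtain rfl := pv_classify_Pipe hd; decide
  case LP => obtain rfl := pv_classify_LP hd; decide
  case RP => obtain rfl := pv_classify_RP hd; decide
  case Lt => obtain rfl := pv_classify_Lt hd; decide
  case L => have hdu := pv_classify_L hd; simp [pvLS, pv_succ, hdu]
  case Bad =>
    obtain ⟨hda, hdb, hd1, hd2, hd3, hd4, hd5, hd6, hd7, hd8, hd9, hd10⟩ := pv_classify_Bad hd
    simp [pvLS, pv_succ, hda, hdb, hd7]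

theorem pvRE_eq (c : Char) (hc : pv_classify c ≠ .Bad) :
    pvRE c = pv_succ (pv_classify c) .E := by
  rcases hc2 : pv_classify c
  case S => exact absurd hc2 (pv_classify_ne_S c)
  case E => exact absurd hc2 (pv_classify_ne_E c)
  case Bad => exact absurd hc2 hc
  case Bang => obtain rfl := pv_classify_Bang hc2; decide
  case Caret => obtain rfl := pv_classify_Caret hc2; decide
  case Plus => obtain rfl := pv_classify_Plus hc2; decide
  case Pipe => obtain rfl := pv_classify_Pipe hc2; decide
  case LP => obtain rfl := pv_classify_LP hc2; decide
  case RP => obtain rfl := pv_classify_RP hc2; decide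
  case Lt => obtain rfl := pv_classify_Lt hc2; decide
  case L => have hcu := pv_classify_L hc2; simp [pvRE, pv_succ, hcu]

theorem pvR_bad {c e : Char} (hc : pv_classify c ≠ .Bad) (he : pv_classify e = .Bad) :
    pvR c e = false := by
  obtain ⟨hea, heb, he1, he2, he3, he4, he5, he6, he7, he8, he9, he10⟩ := pv_classify_Bad he
  rcases hc2 : pv_classify c
  case S => exact absurd hc2 (pv_classify_ne_S c)
  case E => exact absurd hc2 (pv_classify_ne_E c)
  case Bad => exact absurd hc2 hc
  case L =>
    have hcu := pv_classify_L hc2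
    simp [pvR, hcu, hea, pv_ops_g_L, List.contains_cons, List.contains_nil,
      he2, he3, he4, he6, he7, he10]
  case Bang =>
    obtain rfl := pv_classify_Bang hc2
    simp [pvR, hea, pv_ops_g_bang, pv_ops_has_bang, pv_is_upper_single,
      List.contains_cons, List.contains_nil, he5, he9]
  case Caret =>
    obtain rfl := pv_classify_Caret hc2
    simp [pvR, hea, pv_ops_g_caret, pv_ops_has_caret, pv_is_upper_single,
      List.contains_cons, List.contains_nil, he1, he5, he9]
  case Plus =>
    obtain rfl := pv_classify_Plus hc2
    simp [pvR, hea, pv_ops_g_plus, pv_ops_has_plus, pv_is_upper_single,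
      List.contains_cons, List.contains_nil, he1, he5, he9]
  case Pipe =>
    obtain rfl := pv_classify_Pipe hc2
    simp [pvR, hea, pv_ops_g_pipe, pv_ops_has_pipe, pv_is_upper_single,
      List.contains_cons, List.contains_nil, he1, he5, he9]
  case LP =>
    obtain rfl := pv_classify_LP hc2
    simp [pvR, hea, pv_ops_g_lp, pv_ops_has_lp, pv_is_upper_single,
      List.contains_cons, List.contains_nil, he5, he9]
  case RP =>
    obtain rfl := pv_classify_RP hc2
    simp [pvR, hea, pv_ops_g_rp, pv_ops_has_rp, pv_is_upper_single,
      List.contains_cons, List.contains_nil, he2, he3, he4, he7, he10]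
  case Lt =>
    obtain rfl := pv_classify_Lt hc2
    simp [pvR, pv_ops_not_lt, pv_is_upper_single]

theorem pvM (c d : Char) (hc : pv_classify c ≠ .Bad) :
    (pvR c d && pvL c d) = pv_succ (pv_classify c) (pv_classify d) := by
  rcases hc2 : pv_classify c <;> rcases hd : pv_classify d <;>
    first
      | exact absurd hc2 (pv_classify_ne_S c)
      | exact absurd hc2 (pv_classify_ne_E c)
      | exact absurd hc2 hc
      | exact absurd hd (pv_classify_ne_S d)
      | exact absurd hd (pv_classify_ne_E d)
      | (try obtain rfl := pv_classify_Bang hc2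
         try obtain rfl := pv_classify_Caret hc2
         try obtain rfl := pv_classify_Plus hc2
         try obtain rfl := pv_classify_Pipe hc2
         try obtain rfl := pv_classify_LP hc2
         try obtain rfl := pv_classify_RP hc2
         try obtain rfl := pv_classify_Lt hc2
         try have hcu := pv_classify_L hc2
         try obtain rfl := pv_classify_Bang hd
         try obtain rfl := pv_classify_Caret hd
         try obtain rfl := pv_classify_Plus hd
         try obtain rfl := pv_classify_Pipe hd
         try obtain rfl := pv_classify_LP hd
         try obtain rfl := pv_classify_RP hd
         try obtain rfl := pv_classify_Lt hd
         try have hdu := pv_classify_L hd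
         try obtain ⟨hda, hdb, hd1, hd2, hd3, hd4, hd5, hd6, hd7, hd8, hd9, hd10⟩ :=
           pv_classify_Bad hd
         first
           | decide
           | simp_all [pvR, pvL, pv_succ,
               pv_up_bang, pv_up_caret, pv_up_plus, pv_up_pipe, pv_up_lp, pv_up_rp, pv_up_lt,
               pv_ops_g_bang, pv_ops_g_caret, pv_ops_g_plus, pv_ops_g_pipe,
               pv_ops_g_lp, pv_ops_g_rp, pv_ops_g_L,
               pv_ops_has_bang, pv_ops_has_caret, pv_ops_has_plus, pv_ops_has_pipe,
               pv_ops_has_lp, pv_ops_has_rp, pv_ops_not_lt,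
               List.contains_cons, List.contains_nil])

-- index plumbing
theorem pv_loopA_end (part : List Char) (i : Nat) (h : part.length ≤ i) :
    pv_loopA part i = true := by
  rw [pv_loopA]; rw [dif_neg (by omega)]

theorem pv_if_false (b x : Bool) : (if b = true then false else x) = (!b && x) := by
  cases b <;> simp

theorem pv_scan_cons (t : PvTok) (c : Char) (s : List Char) :
    pv_scan t (c :: s) = (pv_succ t (pv_classify c) && pv_scan (pv_classify c) s) := by
  rw [pv_scan]; cases h : pv_succ t (pv_classify c) <;> simp [h]

theorem pv_getD_at (pre tail : List Char) (k : Nat) (d : Char) :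
    (pre ++ tail).getD (pre.length + k) d = tail.getD k d := by
  simp [List.getD_eq_getElem?_getD,
    List.getElem?_append_right (by omega : pre.length ≤ pre.length + k)]

-- one unfolding of A's while loop, i in range, phrased through the split checks
theorem pv_loopA_body (part : List Char) (i : Nat) (h : i < part.length) :
    pv_loopA part i =
      ((if i = 0 then pvLS (part.getD i ' ') else pvL (part.getD (i - 1) ' ') (part.getD i ' ')) &&
       (if i + 1 < part.length then pvR (part.getD i ' ') (part.getD (i + 1) ' ')
        else pvRE (part.getD i ' ')) &&
       pv_loopA part (i + 1)) := by
  conv_lhs => rw [pv_loopA]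
  rw [dif_pos h]
  by_cases hu : pv_is_upper [part.getD i ' '] = true
  · simp only [pvLS, pvL, pvR, pvRE, hu, if_true]
    rcases Nat.eq_zero_or_pos i with h0 | h0
    · subst h0
      simp only [if_pos rfl]
      by_cases h1 : 0 + 1 < part.length
      · simp [h1, Bool.and_assoc]
      · simp [h1]
    · have h0' : i ≠ 0 := by omega
      simp only [decide_eq_true (show 0 < i from h0), if_neg h0', Bool.true_and]
      by_cases h1 : i + 1 < part.length
      · simp [h1, pv_if_false, Bool.and_assoc]
      · simp [h1, pv_if_false]
  · rw [Bool.not_eq_true] at hu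
    by_cases hop : pv_ops.contains (part.getD i ' ') = true
    · simp only [pvLS, pvL, pvR, pvRE, hu, hop, Bool.false_eq_true, if_false, if_true]
      by_cases h0 : i = 0
      · subst h0
        by_cases h1 : 0 + 1 < part.length
        · simp [h1, show ¬ (part.length ≤ 0 + 1) by omega, Bool.and_assoc,
            apply_ite (fun b : Bool => !b), Bool.not_not]
        · simp [h1, show part.length ≤ 0 + 1 by omega, Bool.and_assoc,
            apply_ite (fun b : Bool => !b), Bool.not_not]
      · by_cases h1 : i + 1 < part.length
        · simp [h0, h1, show ¬ (part.length ≤ i + 1) by omega, Bool.and_assoc,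
            apply_ite (fun b : Bool => !b), Bool.not_not]
        · simp [h0, h1, show part.length ≤ i + 1 by omega, Bool.and_assoc,
            apply_ite (fun b : Bool => !b), Bool.not_not]
    · rw [Bool.not_eq_true] at hop
      simp only [pvLS, pvL, pvR, pvRE, hu, hop, Bool.false_eq_true, if_false]
      by_cases hlt : part.getD i ' ' = '<'
      · by_cases hend : i + 1 = part.length
        · simp [hlt, hend, show ¬ (i + 1 < i + 1) from lt_irrefl _, h]
        · have h1 : i + 1 < part.length := by omega
          simp [hlt, hend, h1, h]
      · rw [List.getD_eq_getElem?_getD, List.getElem?_eq_getElem h, Option.getD_some] at hlt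
        simp [hlt, h]

-- main suffix invariant: after the character c at index pre.length has passed its own checks
-- up to its successor half, the rest of A's loop is B's state machine started in c's class
theorem pv_suffix (cur : List Char) : ∀ (pre : List Char) (c : Char), pv_classify c ≠ .Bad →
    (pvREnd c cur && pv_loopA (pre ++ c :: cur) (pre.length + 1)) =
      pv_scan (pv_classify c) cur := by
  induction cur with
  | nil =>
    intro pre c hc
    rw [pv_loopA_end _ _ (by simp)]
    simp only [pvREnd, pv_scan, Bool.and_true]
    exact pvRE_eq c hc
  | cons e rest ih =>
    intro pre c hc
    have hi : pre.length + 1 < (pre ++ c :: e :: rest).length := by simp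
    rw [pv_loopA_body _ _ hi]
    have g0 : (pre ++ c :: e :: rest).getD (pre.length + 1 - 1) ' ' = c := by
      have := pv_getD_at pre (c :: e :: rest) 0 ' '
      simpa using this
    have g1 : (pre ++ c :: e :: rest).getD (pre.length + 1) ' ' = e := by
      have := pv_getD_at pre (c :: e :: rest) 1 ' '
      simpa using this
    rw [if_neg (by omega : ¬ (pre.length + 1 = 0)), g0, g1]
    simp only [pvREnd]
    by_cases hB : pv_classify e = .Bad
    · have hre : pvR c e = false := pvR_bad hc hB
      rw [pv_scan_cons, hB, pv_succ_bad, hre]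
      simp
    · have hrec : ((if pre.length + 1 + 1 < (pre ++ c :: e :: rest).length then
            pvR e ((pre ++ c :: e :: rest).getD (pre.length + 1 + 1) ' ')
          else pvRE e) && pv_loopA (pre ++ c :: e :: rest) (pre.length + 1 + 1)) =
          pv_scan (pv_classify e) rest := by
        cases rest with
        | nil =>
          rw [if_neg (by simp), pv_loopA_end _ _ (by simp)]
          simp only [Bool.and_true, pv_scan]
          exact pvRE_eq e hB
        | cons f rest' =>
          have hlt : pre.length + 1 + 1 < (pre ++ c :: e :: f :: rest').length := by
            simp; omega
          rw [if_pos hlt]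
          have g2 : (pre ++ c :: e :: f :: rest').getD (pre.length + 1 + 1) ' ' = f := by
            have := pv_getD_at pre (c :: e :: f :: rest') 2 ' '
            simpa [Nat.add_assoc] using this
          rw [g2]
          have hasc : pre ++ c :: e :: f :: rest' = (pre ++ [c]) ++ e :: f :: rest' := by simp
          have hlen2 : pre.length + 1 + 1 = (pre ++ [c]).length + 1 := by simp
          have hih := ih (pre ++ [c]) e hB
          simp only [pvREnd] at hih
          rw [hasc, hlen2]
          exact hih
      simp only [Bool.and_assoc]
      rw [hrec, pv_scan_cons, ← pvM c e hc]
      simp [Bool.and_assoc]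

theorem pv_loopA_eq_scan (d : Char) (rest : List Char) :
    pv_loopA (d :: rest) 0 = pv_scan .S (d :: rest) := by
  by_cases hB : pv_classify d = .Bad
  · obtain ⟨hda, hdb, hd1, hd2, hd3, hd4, hd5, hd6, hd7, hd8, hd9, hd10⟩ := pv_classify_Bad hB
    rw [pv_loopA_body _ 0 (by simp), pv_scan_cons, hB, pv_succ_bad]
    have hLS : pvLS d = false := by simp [pvLS, hda, hdb, hd7]
    simp [hLS, List.getD_cons_zero]
  · rw [pv_loopA_body _ 0 (by simp)]
    rw [if_pos rfl]
    have g0 : (d :: rest).getD 0 ' ' = d := by simp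
    rw [g0]
    have hrec : ((if 0 + 1 < (d :: rest).length then
          pvR d ((d :: rest).getD (0 + 1) ' ')
        else pvRE d) && pv_loopA (d :: rest) (0 + 1)) = pv_scan (pv_classify d) rest := by
      cases rest with
      | nil =>
        rw [if_neg (by simp), pv_loopA_end _ _ (by simp)]
        simp only [Bool.and_true, pv_scan]
        exact pvRE_eq d hB
      | cons f rest' =>
        rw [if_pos (by simp)]
        have g1 : (d :: f :: rest').getD (0 + 1) ' ' = f := by simp
        rw [g1]
        have hsuf := pv_suffix (f :: rest') [] d hB
        simp only [pvREnd, List.nil_append, List.length_nil] at hsuf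
        simpa using hsuf
    simp only [Bool.and_assoc]
    rw [hrec, pv_scan_cons, pvLS_eq]

theorem pv_brackets_eq (s : List Char) : ∀ (stack : List Char),
    pv_brackets_go stack s = pv_balanced_go (stack.length : Int) s := by
  induction s with
  | nil =>
    intro stack
    cases stack with
    | nil => simp [pv_brackets_go, pv_balanced_go]
    | cons x st =>
      simp only [pv_brackets_go, pv_balanced_go]
      simp only [List.length_cons, List.isEmpty_cons]
      symm
      simp only [beq_eq_false_iff_ne, ne_eq]
      push_cast
      omega
  | cons c s ih =>
    intro stack
    simp only [pv_brackets_go, pv_balanced_go]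
    by_cases h1 : c = '('
    · simp only [h1, if_pos rfl]
      have hl : ((('(' :: stack).length : Nat) : Int) = (stack.length : Int) + 1 := by
        simp
      have := ih ('(' :: stack)
      rw [hl] at this
      exact this
    · by_cases h2 : c = ')'
      · simp only [if_neg h1, h2, if_pos rfl]
        cases stack with
        | nil => simp
        | cons x st =>
          have hge : ¬ ((((x :: st).length : Nat) : Int) - 1 < 0) := by
            simp only [List.length_cons]; push_cast; omega
          rw [if_neg hge]
          have harith : (((x :: st).length : Nat) : Int) - 1 = (st.length : Int) := by
            simp only [List.length_cons]; push_cast; omega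
          rw [harith]
          exact ih st
      · rw [if_neg h1, if_neg h2, if_neg h1, if_neg h2]
        exact ih stack

theorem pv_part_eq (p : List Char) (rest : List (List Char)) :
    pv_partsA (p :: rest) = (pv_partB p && pv_partsA rest) := by
  simp only [pv_partsA, pv_partB]
  cases hbr : pv_balanced_go 0 p with
  | false =>
    have hb2 : pv_brackets_go [] p = false := by
      have := pv_brackets_eq p []
      simpa [hbr] using this
    simp [pv_brackets, hb2]
  | true =>
    have hb2 : pv_brackets_go [] p = true := by
      have := pv_brackets_eq p []
      simpa [hbr] using this
    cases p with
    | nil => simp [pv_brackets, hb2, pv_scan, pv_succ]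
    | cons d r =>
      have h1 : ¬ ((d :: r).length < 1) := by simp
      simp [pv_brackets, hb2, h1, pv_loopA_eq_scan]

theorem pv_parts_eq (ps : List (List Char)) : pv_partsA ps = ps.all pv_partB := by
  induction ps with
  | nil => rfl
  | cons p rest ih => rw [pv_part_eq, List.all_cons, ih]

-- ===== VERDICT (by name: the statement is the Claim_ definition above) =====
theorem rule_is_valid_spec : Claim_equal_rule_is_valid := by
  intro line _
  unfold Spec_rule_is_valid rule_is_valid rule_is_valid_alt
  by_cases h : (PySem.Chars.splitOn line.toList ['=', '>']).length ≠ 2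
  · simp [h]
  · simp [h, pv_parts_eq]
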